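-- pv_equiv track=rewrite | github.com/kjhsu1/mcb185_homework | 74genefinder.py | list_of_starts
-- ===== SOURCE A (Python) =====
-- def list_of_starts(seq, frame):
-- 	starts = [] # store start codon coords
-- 	w = 3 # window
-- 	if frame == 1:
-- 		# sliding window, k = 3
-- 		for i in range(0, len(seq) -w +1, w):
-- 			window = seq[i:i+w]
-- 			if window == 'ATG':
-- 				starts.append(i+1) # +1 to adjust to 1-index coords
-- 	if frame == 2:
-- 		for i in range(1, len(seq) -w +1, w): # skip first nt, start at second
-- 			window = seq[i:i+w]
-- 			if window == 'ATG':
-- 				starts.append(i+1)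
-- 	if frame == 3:
-- 		# skip first and second nt, start at 3rd
-- 		for i in range(2, len(seq) -w +1, w):
-- 			window = seq[i:i+w]
-- 			if window == 'ATG':
-- 				starts.append(i+1)
-- 	return starts
-- ===== SOURCE B (Python) =====
-- def list_of_starts(seq, frame):
-- 	if frame not in (1, 2, 3):
-- 		return []
-- 	offset = frame - 1
-- 	starts = []
-- 	start = 0
-- 	while True:
-- 		i = seq.find('ATG', start)
-- 		if i == -1:
-- 			return starts
-- 		if (i - offset) % 3 == 0:
-- 			starts.append(i + 1)
-- 		start = i + 1
-- ===== Notes on version B (the rewrite author's own statement) =====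
-- stated objective: idiomatic
-- what changed: B replaces A's three per-frame loops that slice and compare every third window with a single seq.find('ATG', start) loop that jumps between ATG occurrences and keeps those matching the reading-frame congruence (i - (frame-1)) % 3 == 0.
import Mathlib
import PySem

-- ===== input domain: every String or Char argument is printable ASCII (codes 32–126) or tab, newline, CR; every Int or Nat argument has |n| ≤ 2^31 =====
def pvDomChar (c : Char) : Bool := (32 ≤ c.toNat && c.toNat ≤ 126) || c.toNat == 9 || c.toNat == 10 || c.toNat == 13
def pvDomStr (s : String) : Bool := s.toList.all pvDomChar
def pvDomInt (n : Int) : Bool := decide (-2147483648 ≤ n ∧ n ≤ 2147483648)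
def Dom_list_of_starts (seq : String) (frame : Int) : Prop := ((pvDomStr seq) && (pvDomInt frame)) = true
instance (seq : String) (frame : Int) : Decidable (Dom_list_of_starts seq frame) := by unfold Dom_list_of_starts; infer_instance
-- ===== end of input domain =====

-- B replaces A's three per-frame codon-stepping loops by a single substring-search loop
-- (seq.find('ATG', start)) filtered by the reading-frame congruence (objective: idiomatic).

-- ===== PORT A =====
def list_of_starts (seq : String) (frame : Int) : List Int :=
  let starts : List Int := []
  let w : Int := 3
  let starts :=
    if frame = 1 then
      (PySem.List.pyRange 0 (PySem.Str.len seq - w + 1) w).foldl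
        (fun acc i => if PySem.Str.slice seq (some i) (some (i + w)) = "ATG" then acc ++ [i + 1] else acc) starts
    else starts
  let starts :=
    if frame = 2 then
      (PySem.List.pyRange 1 (PySem.Str.len seq - w + 1) w).foldl
        (fun acc i => if PySem.Str.slice seq (some i) (some (i + w)) = "ATG" then acc ++ [i + 1] else acc) starts
    else starts
  let starts :=
    if frame = 3 then
      (PySem.List.pyRange 2 (PySem.Str.len seq - w + 1) w).foldl
        (fun acc i => if PySem.Str.slice seq (some i) (some (i + w)) = "ATG" then acc ++ [i + 1] else acc) starts
    else starts
  starts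

-- ===== PORT B =====
-- the while-True find loop of Source B; the fuel parameter only makes the recursion total,
-- it is never exhausted while a further match remains
def lbGo (seq : String) (offset : Int) : Nat → Int → List Int → List Int
  | 0, _, starts => starts
  | fuel + 1, start, starts =>
    let i := PySem.Str.findFrom seq "ATG" start none
    if i = -1 then starts
    else lbGo seq offset fuel (i + 1)
      (if PySem.Int.mod (i - offset) 3 = 0 then starts ++ [i + 1] else starts)

def list_of_starts_alt (seq : String) (frame : Int) : List Int :=
  if ¬ (frame = 1 ∨ frame = 2 ∨ frame = 3) then []
  else lbGo seq (frame - 1) (seq.toList.length + 1) 0 []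

-- ===== PRECONDITION & SPEC =====
def Spec_list_of_starts (seq : String) (frame : Int) (out : List Int) : Prop := out = list_of_starts_alt seq frame
instance (seq : String) (frame : Int) (out : List Int) : Decidable (Spec_list_of_starts seq frame out) := by unfold Spec_list_of_starts; infer_instance

-- ===== CLAIM (what is proved, stated in full; the proofs are below) =====
def Claim_equal_list_of_starts : Prop := ∀ (seq : String) (frame : Int), Dom_list_of_starts seq frame → Spec_list_of_starts seq frame (list_of_starts seq frame)

-- ===== LEMMAS AND PROOFS =====

-- indices ≥ k at which 'ATG' occurs in the reading frame with offset `off`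
def atgQ (cs : List Char) (off : Int) (i : Nat) : Bool :=
  decide (['A','T','G'] <+: cs.drop i) && decide (PySem.Int.mod ((i : Int) - off) 3 = 0)

def posFrom (cs : List Char) (off : Int) (k : Nat) : List Nat :=
  (List.range' k (cs.length - k)).filter (atgQ cs off)

lemma infix_of_prefix_drop {cs pat : List Char} {k j : Nat} (hk : k ≤ j)
    (h : pat <+: cs.drop j) : pat <:+: cs.drop k := by
  have hdd : (cs.drop k).drop (j - k) = cs.drop j := by
    rw [List.drop_drop]; congr 1; omega
  exact (hdd ▸ h).isInfix.trans (List.drop_suffix _ _).isInfix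

lemma lbGo_eq (seq : String) (off : Int) :
    ∀ fuel (k : Nat) (starts : List Int), k ≤ seq.toList.length →
      seq.toList.length + 1 - k ≤ fuel →
      lbGo seq off fuel (k : Int) starts
        = starts ++ (posFrom seq.toList off k).map (fun i : Nat => (i : Int) + 1) := by
  intro fuel
  induction fuel with
  | zero => intro k starts hk hf; omega
  | succ fuel ih =>
    intro k starts hk hf
    have hpat : "ATG".toList = ['A','T','G'] := rfl
    simp only [lbGo, PySem.Str.findFrom_eq, hpat]
    by_cases hneg : PySem.Chars.findFrom seq.toList ['A','T','G'] (k : Int) none = -1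
    · rw [if_pos hneg]
      have hno : ¬ (['A','T','G'] <:+: seq.toList.drop k) :=
        (PySem.Chars.findFrom_natCast_eq_neg_one_iff seq.toList _ k hk).mp hneg
      have : posFrom seq.toList off k = [] := by
        refine List.filter_eq_nil_iff.mpr ?_
        intro j hj hq
        rcases List.mem_range'_1.mp hj with ⟨hkj, _⟩
        have hpre : ['A','T','G'] <+: seq.toList.drop j := by
          have := (Bool.and_eq_true _ _).mp hq |>.1
          exact of_decide_eq_true this
        exact hno (infix_of_prefix_drop hkj hpre)
      rw [this]; simp
    · rw [if_neg hneg]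
      obtain ⟨hge, hpre, hmin⟩ :=
        PySem.Chars.findFrom_natCast_spec seq.toList ['A','T','G'] k hk hneg
      set i := PySem.Chars.findFrom seq.toList ['A','T','G'] (k : Int) none with hi
      have h0i : 0 ≤ i := le_trans (by exact_mod_cast Int.natCast_nonneg k) hge
      set n := i.toNat with hn
      have hin : i = (n : Int) := (Int.toNat_of_nonneg h0i).symm
      have hkn : k ≤ n := by omega
      have hlen : n + 3 ≤ seq.toList.length := by
        have h3 : (['A','T','G'] : List Char).length ≤ (seq.toList.drop n).length :=
          hpre.length_le
        simp only [List.length_drop, List.length_cons, List.length_nil] at h3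
        omega
      -- split posFrom at n
      have hsplit : posFrom seq.toList off k
          = (if atgQ seq.toList off n then n :: posFrom seq.toList off (n + 1)
             else posFrom seq.toList off (n + 1)) := by
        unfold posFrom
        rw [show seq.toList.length - k = (n - k) + (seq.toList.length - n) by omega,
            ← List.range'_append,
            show k + 1 * (n - k) = n by omega]
        rw [List.filter_append]
        have h1 : (List.range' k (n - k)).filter (atgQ seq.toList off) = [] := by
          refine List.filter_eq_nil_iff.mpr ?_
          intro j hj hq
          rcases List.mem_range'_1.mp hj with ⟨hkj, hjn⟩
          have hpre' : ['A','T','G'] <+: seq.toList.drop j := by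
            have := (Bool.and_eq_true _ _).mp hq |>.1
            exact of_decide_eq_true this
          exact hmin j hkj (by omega) hpre'
        rw [h1, List.nil_append,
            show seq.toList.length - n = (seq.toList.length - (n + 1)) + 1 by omega,
            List.range'_succ, List.filter_cons]
      have hrec := ih (n + 1)
        (if PySem.Int.mod (i - off) 3 = 0 then starts ++ [i + 1] else starts)
        (by omega) (by omega)
      rw [show i + 1 = ((n + 1 : Nat) : Int) by omega] at hrec ⊢
      rw [hrec, hsplit]
      have hq : atgQ seq.toList off n
          = decide (PySem.Int.mod ((n : Int) - off) 3 = 0) := by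
        unfold atgQ
        rw [decide_eq_true hpre, Bool.true_and]
      by_cases hmod : PySem.Int.mod ((n : Int) - off) 3 = 0
      · rw [if_pos (by rw [hin]; exact hmod), hq, if_pos (by simpa using hmod)]
        simp
      · rw [if_neg (by rw [hin]; exact hmod), hq, if_neg (by simpa using hmod)]

lemma eq_of_pairwise_lt_of_mem (l₁ l₂ : List Int)
    (h₁ : l₁.Pairwise (· < ·)) (h₂ : l₂.Pairwise (· < ·))
    (hm : ∀ x, x ∈ l₁ ↔ x ∈ l₂) : l₁ = l₂ := by
  have n₁ : l₁.Nodup := h₁.imp ne_of_lt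
  have n₂ : l₂.Nodup := h₂.imp ne_of_lt
  exact List.Perm.eq_of_pairwise (fun a b _ _ hab hba => by omega) h₁ h₂
    ((List.perm_ext_iff_of_nodup n₁ n₂).mpr hm)

lemma slice_eq_iff_prefix (seq : String) (i : Nat) :
    (PySem.Str.slice seq (some (i : Int)) (some ((i : Int) + 3)) = "ATG")
      ↔ ['A','T','G'] <+: seq.toList.drop i := by
  rw [← String.toList_inj, PySem.Str.toList_slice]
  show PySem.List.slice seq.toList (some (i : Int)) (some ((i : Int) + 3)) = "ATG".toList ↔ _
  rw [show ((i : Int) + 3) = ((i : Int) + ((3 : Nat) : Int)) by norm_num,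
      PySem.List.slice_natCast_add, List.prefix_iff_eq_take]
  exact ⟨fun h => h.symm, fun h => h.symm⟩

lemma a_side (seq : String) (off : Int) (h0 : 0 ≤ off) (h3 : off < 3) :
    (PySem.List.pyRange off (PySem.Str.len seq - 3 + 1) 3).foldl
        (fun acc i => if PySem.Str.slice seq (some i) (some (i + 3)) = "ATG" then acc ++ [i + 1] else acc) []
      = (posFrom seq.toList off 0).map (fun i : Nat => (i : Int) + 1) := by
  rw [PySem.List.foldl_append_ite
      (p := fun i => PySem.Str.slice seq (some i) (some (i + 3)) = "ATG")
      (f := fun i => i + 1), List.nil_append]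
  have h : (PySem.List.pyRange off (PySem.Str.len seq - 3 + 1) 3).filter
        (fun i => decide (PySem.Str.slice seq (some i) (some (i + 3)) = "ATG"))
      = (posFrom seq.toList off 0).map (fun n : Nat => (n : Int)) := by
    apply eq_of_pairwise_lt_of_mem
    · refine List.Pairwise.sublist List.filter_sublist ?_
      rw [PySem.List.pyRange_of_pos _ _ (by omega)]
      rw [List.pairwise_map]
      exact List.pairwise_lt_range.imp (fun {a b} h => by omega)
    · rw [List.pairwise_map]
      simp only [posFrom]
      refine List.Pairwise.sublist List.filter_sublist ?_
      exact (List.pairwise_lt_range' 1).imp (fun {a b} h => by exact_mod_cast h)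
    · intro x
      rw [List.mem_filter, PySem.List.mem_pyRange_iff_of_pos (by omega), List.mem_map]
      simp only [PySem.Str.len_eq, posFrom]
      constructor
      · rintro ⟨⟨hox, hxb, hdvd⟩, hp⟩
        have h0x : 0 ≤ x := le_trans h0 hox
        set n := x.toNat with hn
        have hxn : x = (n : Int) := (Int.toNat_of_nonneg h0x).symm
        have hpre : ['A','T','G'] <+: seq.toList.drop n := by
          rw [hxn] at hp
          exact (slice_eq_iff_prefix seq n).mp (of_decide_eq_true hp)
        have hlen : n + 3 ≤ seq.toList.length := by
          have := hpre.length_le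
          simp only [List.length_drop, List.length_cons, List.length_nil] at this
          omega
        refine ⟨n, List.mem_filter.mpr ⟨?_, ?_⟩, hxn.symm⟩
        · exact List.mem_range'_1.mpr ⟨by omega, by omega⟩
        · unfold atgQ
          rw [decide_eq_true hpre, Bool.true_and, decide_eq_true_eq,
              PySem.Int.mod_eq_zero_iff_dvd]
          rw [← hxn]; exact hdvd
      · rintro ⟨n, hnmem, hnx⟩
        rcases List.mem_filter.mp hnmem with ⟨hr, hq⟩
        rcases List.mem_range'_1.mp hr with ⟨-, hlt⟩
        rcases (Bool.and_eq_true _ _).mp hq with ⟨hq1, hq2⟩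
        have hpre : ['A','T','G'] <+: seq.toList.drop n := of_decide_eq_true hq1
        have hdvd : (3 : Int) ∣ (n : Int) - off :=
          (PySem.Int.mod_eq_zero_iff_dvd _ _).mp (of_decide_eq_true hq2)
        have hlen : n + 3 ≤ seq.toList.length := by
          have := hpre.length_le
          simp only [List.length_drop, List.length_cons, List.length_nil] at this
          omega
        subst hnx
        refine ⟨⟨by omega, by omega, hdvd⟩, ?_⟩
        exact decide_eq_true ((slice_eq_iff_prefix seq n).mpr hpre)
  rw [h, List.map_map]
  rfl

-- ===== VERDICT (by name: the statement is the Claim_ definition above) =====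
theorem list_of_starts_spec : Claim_equal_list_of_starts := by
  intro seq frame _
  unfold Spec_list_of_starts list_of_starts list_of_starts_alt
  by_cases h1 : frame = 1
  · subst h1
    norm_num
    have hb := lbGo_eq seq 0 (seq.toList.length + 1) 0 [] (Nat.zero_le _) (by omega)
    simp only [Nat.cast_zero, String.length_toList, List.nil_append] at hb
    rw [hb]
    simpa using a_side seq 0 (by norm_num) (by norm_num)
  · by_cases h2 : frame = 2
    · subst h2
      norm_num
      have hb := lbGo_eq seq 1 (seq.toList.length + 1) 0 [] (Nat.zero_le _) (by omega)
      simp only [Nat.cast_zero, String.length_toList, List.nil_append] at hb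
      rw [hb]
      simpa using a_side seq 1 (by norm_num) (by norm_num)
    · by_cases h3 : frame = 3
      · subst h3
        norm_num
        have hb := lbGo_eq seq 2 (seq.toList.length + 1) 0 [] (Nat.zero_le _) (by omega)
        simp only [Nat.cast_zero, String.length_toList, List.nil_append] at hb
        rw [hb]
        simpa using a_side seq 2 (by norm_num) (by norm_num)
      · simp [h1, h2, h3]
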